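-- pv_equiv track=rewrite | github.com/krju13/SolveTheCheckioProblem | O_reilly/sortExceptZero.py | except_zero
-- ===== SOURCE A (Python) =====
-- from typing import Iterable
--
-- def except_zero(items: list) -> Iterable:
--     sol=sorted(items)
--     i,j=0,0
--     while i<len(items) and j<len(items):
--         if(sol[j])==0:
--             j+=1
--         elif items[i]==0:
--             i+=1
--         else:
--             items[i]=sol[j]
--             i+=1
--             j+=1
--     return items
-- ===== SOURCE B (Python) =====
-- def except_zero(items: list):
--     idxs = [i for i, x in enumerate(items) if x != 0]
--     vals = [x for x in items if x != 0]
--     # in-place selection sort of the non-zero values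
--     for a in range(len(vals)):
--         m = a
--         for b in range(a + 1, len(vals)):
--             if vals[b] < vals[m]:
--                 m = b
--         vals[a], vals[m] = vals[m], vals[a]
--     for i, v in zip(idxs, vals):
--         items[i] = v
--     return items
-- ===== Notes on version B (the rewrite author's own statement) =====
-- stated objective: alternative
-- what changed: B replaces A's library-sort-plus-two-pointer merge walk by a hand-written in-place selection sort of the non-zero values followed by a scatter back into the recorded non-zero positions; it never calls sorted().
import Mathlib
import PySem

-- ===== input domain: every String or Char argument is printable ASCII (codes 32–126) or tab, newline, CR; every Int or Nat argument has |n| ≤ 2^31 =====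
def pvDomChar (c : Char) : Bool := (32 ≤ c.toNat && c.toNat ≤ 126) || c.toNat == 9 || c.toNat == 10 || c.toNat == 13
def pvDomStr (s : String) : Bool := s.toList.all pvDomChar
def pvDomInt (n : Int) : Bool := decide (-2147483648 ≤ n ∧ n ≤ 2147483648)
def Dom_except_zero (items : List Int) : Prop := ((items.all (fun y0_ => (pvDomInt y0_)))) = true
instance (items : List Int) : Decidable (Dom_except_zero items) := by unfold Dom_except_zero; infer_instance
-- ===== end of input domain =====

-- B replaces A's library-sort-plus-two-pointer merge walk by a hand-written in-place
-- selection sort of the non-zero values, scattered back into the recorded non-zero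
-- positions (alternative algorithm; not claimed faster).
-- Both Pythons mutate their argument in place; the equivalence proved here is about the return value.

-- ===== PORT A =====
-- the while loop of A: sol is the sorted copy, items the list being mutated, i, j the two pointers
def exceptZeroLoopA (sol : List Int) (items : List Int) (i j : Nat) : List Int :=
  if h : i < items.length ∧ j < items.length then
    if sol.getD j 0 = 0 then
      exceptZeroLoopA sol items i (j + 1)
    else if items.getD i 0 = 0 then
      exceptZeroLoopA sol items (i + 1) j
    else
      exceptZeroLoopA sol (items.set i (sol.getD j 0)) (i + 1) (j + 1)
  else
    items
termination_by (items.length - i) + (items.length - j)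
decreasing_by
  · omega
  · omega
  · simp only [List.length_set]; omega

def except_zero (items : List Int) : List Int :=
  exceptZeroLoopA (PySem.List.sorted items (fun x => x) false) items 0 0

-- ===== PORT B =====
-- B's inner loop: for b in range(b0, len(vals)): if vals[b] < vals[m]: m = b
def selArgminB (vals : List Int) (m b : Nat) : Nat :=
  if h : b < vals.length then
    if vals.getD b 0 < vals.getD m 0 then selArgminB vals b (b + 1)
    else selArgminB vals m (b + 1)
  else m
termination_by vals.length - b

-- B's outer loop: for a in range(len(vals)): m = argmin of vals[a:]; swap vals[a], vals[m]
def selSortLoopB (vals : List Int) (a : Nat) : List Int :=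
  if h : a < vals.length then
    let m := selArgminB vals a (a + 1)
    selSortLoopB ((vals.set a (vals.getD m 0)).set m (vals.getD a 0)) (a + 1)
  else vals
termination_by vals.length - a
decreasing_by simp only [List.length_set]; omega

-- idxs = non-zero positions (via enumerate), vals = non-zero values, then the
-- selection-sorted vals are written back at idxs (for i, v in zip(idxs, vals): items[i] = v)
def except_zero_alt (items : List Int) : List Int :=
  ((((PySem.List.enumerate items 0).filter (fun p => decide (p.2 ≠ 0))).map Prod.fst).zip
      (selSortLoopB (items.filter (fun x => decide (x ≠ 0))) 0)).foldl
    (fun acc p => acc.set p.1.toNat p.2) items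

-- ===== PRECONDITION & SPEC =====
def Spec_except_zero (items : List Int) (out : List Int) : Prop := out = except_zero_alt items
instance (items : List Int) (out : List Int) : Decidable (Spec_except_zero items out) := by unfold Spec_except_zero; infer_instance

-- ===== CLAIM (what is proved, stated in full; the proofs are below) =====
def Claim_equal_except_zero : Prop := ∀ (items : List Int), Dom_except_zero items → Spec_except_zero items (except_zero items)

-- ===== LEMMAS AND PROOFS =====

-- proof-side "fill": replace the non-zero entries of items, in order, by the entries of s
def ezFill (items : List Int) (s : List Int) : List Int :=
  match items with
  | [] => []
  | x :: xs =>
    if x ≠ 0 then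
      match s with
      | v :: s' => v :: ezFill xs s'
      | [] => x :: ezFill xs []
    else
      x :: ezFill xs s

theorem ezTakeSet (l : List Int) (i : Nat) (v : Int) (h : i < l.length) :
    (l.set i v).take (i + 1) = l.take i ++ [v] := by
  induction l generalizing i with
  | nil => simp at h
  | cons x xs ih =>
    cases i with
    | zero => simp
    | succ n => simp [ih n (by simpa using h)]

theorem ezDropSet (l : List Int) (i : Nat) (v : Int) :
    (l.set i v).drop (i + 1) = l.drop (i + 1) := by
  induction l generalizing i with
  | nil => simp
  | cons x xs ih =>
    cases i with
    | zero => simp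
    | succ n => simpa using ih n

theorem ezFill_nil (l : List Int) : ezFill l [] = l := by
  induction l with
  | nil => rfl
  | cons x xs ih => by_cases hx : x = 0 <;> simp [ezFill, hx, ih]

-- A's loop returns the first i entries of items followed by the fill of the rest
-- with the non-zero entries of sol from position j on.
theorem exceptZeroLoopA_eq (sol items : List Int) (hsl : sol.length = items.length) (i j : Nat) :
    exceptZeroLoopA sol items i j =
      items.take i ++ ezFill (items.drop i) ((sol.drop j).filter (fun x => decide (x ≠ 0))) := by
  rw [exceptZeroLoopA]
  by_cases h : i < items.length ∧ j < items.length
  · obtain ⟨hi, hj⟩ := h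
    simp only [dif_pos (And.intro hi hj)]
    have hj' : j < sol.length := by omega
    have hsolj : sol.drop j = sol[j] :: sol.drop (j + 1) := (List.getElem_cons_drop hj').symm
    have hitemsi : items.drop i = items[i] :: items.drop (i + 1) := (List.getElem_cons_drop hi).symm
    have hgd : sol.getD j 0 = sol[j] := List.getD_eq_getElem sol 0 hj'
    have hgdi : items.getD i 0 = items[i] := List.getD_eq_getElem items 0 hi
    by_cases h0 : sol[j]'(by omega) = 0
    · rw [if_pos (by rw [hgd]; exact h0)]
      rw [exceptZeroLoopA_eq sol items hsl i (j + 1), hsolj]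
      simp [h0]
    · rw [if_neg (by rw [hgd]; exact h0)]
      by_cases hz : items[i] = 0
      · rw [if_pos (by rw [hgdi]; exact hz)]
        rw [exceptZeroLoopA_eq sol items hsl (i + 1) j]
        rw [hitemsi, List.take_add_one, List.getElem?_eq_getElem hi]
        simp [ezFill, hz]
      · rw [if_neg (by rw [hgdi]; exact hz)]
        rw [exceptZeroLoopA_eq sol (items.set i (sol.getD j 0)) (by simpa using hsl) (i + 1) (j + 1)]
        rw [ezTakeSet _ _ _ hi, ezDropSet, hsolj, hitemsi, hgd]
        have hf : List.filter (fun x => decide (x ≠ 0)) (sol[j] :: List.drop (j + 1) sol)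
            = sol[j] :: List.filter (fun x => decide (x ≠ 0)) (List.drop (j + 1) sol) := by
          rw [List.filter_cons]; simp [h0]
        rw [hf]
        have hfill : ezFill (items[i] :: List.drop (i + 1) items)
            (sol[j] :: List.filter (fun x => decide (x ≠ 0)) (List.drop (j + 1) sol))
            = sol[j] :: ezFill (List.drop (i + 1) items)
                (List.filter (fun x => decide (x ≠ 0)) (List.drop (j + 1) sol)) := by
          simp [ezFill, hz]
        rw [hfill, List.append_assoc]
        rfl
  · simp only [dif_neg h]
    rcases Nat.lt_or_ge i items.length with hi | hi
    · have hj : sol.length ≤ j := by omega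
      rw [List.drop_of_length_le hj]
      simp [ezFill_nil]
    · rw [List.take_of_length_le hi, List.drop_of_length_le hi]
      simp [ezFill]
termination_by (items.length - i) + (items.length - j)
decreasing_by
  · omega
  · omega
  · simp only [List.length_set]; omega

-- the non-zero entries of sorted(items), in order, are sorted(non-zero entries of items)
theorem ez_filter_sorted_eq (items : List Int) :
    (PySem.List.sorted items (fun x => x) false).filter (fun x => decide (x ≠ 0)) =
      PySem.List.sorted (items.filter (fun x => decide (x ≠ 0))) (fun x => x) false := by
  exact (PySem.List.sorted_id_eq_of_perm_of_pairwise _ _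
    ((PySem.List.sorted_perm items (fun x => x) false).filter _)
    ((PySem.List.sorted_pairwise items (fun x => x)).filter _)).symm

-- ---- B side: the selection sort sorts the suffix ----

-- the inner loop returns an index of a minimum of vals over {m} ∪ [b, len)
theorem selArgminB_spec (vals : List Int) (m b : Nat) (hm : m < vals.length) :
    (selArgminB vals m b = m ∨ (b ≤ selArgminB vals m b ∧ selArgminB vals m b < vals.length)) ∧
    vals.getD (selArgminB vals m b) 0 ≤ vals.getD m 0 ∧
    ∀ k, b ≤ k → k < vals.length → vals.getD (selArgminB vals m b) 0 ≤ vals.getD k 0 := by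
  rw [selArgminB]
  by_cases h : b < vals.length
  · simp only [dif_pos h]
    by_cases hc : vals.getD b 0 < vals.getD m 0
    · rw [if_pos hc]
      obtain ⟨hpos, hle, hall⟩ := selArgminB_spec vals b (b + 1) h
      refine ⟨?_, le_of_lt (lt_of_le_of_lt hle hc), ?_⟩
      · right
        rcases hpos with h1 | h1
        · omega
        · omega
      · intro k hk1 hk2
        rcases Nat.eq_or_lt_of_le hk1 with he | hlt
        · rw [← he]; exact hle
        · exact hall k hlt hk2
    · rw [if_neg hc]
      obtain ⟨hpos, hle, hall⟩ := selArgminB_spec vals m (b + 1) hm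
      refine ⟨?_, hle, ?_⟩
      · rcases hpos with h1 | h1
        · exact Or.inl h1
        · exact Or.inr ⟨by omega, h1.2⟩
      · intro k hk1 hk2
        rcases Nat.eq_or_lt_of_le hk1 with he | hlt
        · rw [← he]; exact le_trans hle (le_of_not_gt hc)
        · exact hall k hlt hk2
  · simp only [dif_neg h]
    exact ⟨Or.inl (by simp), le_refl _, fun k hk1 hk2 => absurd (lt_of_le_of_lt hk1 hk2) h⟩
termination_by vals.length - b

-- a lower bound prepended to (a permutation splitting of) a list sorts to the cons
theorem ez_sorted_perm_cons (x : Int) (L S : List Int)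
    (h : L.Perm (x :: S)) (hx : ∀ y ∈ L, x ≤ y) :
    PySem.List.sorted L (fun v => v) false = x :: PySem.List.sorted S (fun v => v) false := by
  refine PySem.List.sorted_id_eq_of_perm_of_pairwise _ _ ?_ ?_
  · exact (List.Perm.cons x (PySem.List.sorted_perm S (fun v => v) false)).trans h.symm
  · refine List.pairwise_cons.mpr ⟨?_, PySem.List.sorted_pairwise S (fun v => v)⟩
    intro y hy
    exact hx y (h.mem_iff.mpr (List.mem_cons_of_mem x
      ((PySem.List.sorted_perm S (fun v => v) false).mem_iff.mp hy)))

-- the outer loop, started at a, leaves the prefix untouched and sorts the suffix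
theorem selSortLoopB_eq (vals : List Int) (a : Nat) :
    selSortLoopB vals a = vals.take a ++ PySem.List.sorted (vals.drop a) (fun x => x) false := by
  rw [selSortLoopB]
  by_cases h : a < vals.length
  · simp only [dif_pos h]
    show selSortLoopB
        ((vals.set a (vals.getD (selArgminB vals a (a + 1)) 0)).set
          (selArgminB vals a (a + 1)) (vals.getD a 0)) (a + 1) = _
    obtain ⟨hpos, hle, hall⟩ := selArgminB_spec vals a (a + 1) h
    set m := selArgminB vals a (a + 1) with hmdef
    have hm : m < vals.length := by
      rcases hpos with h1 | h1
      · omega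
      · exact h1.2
    have ham : a ≤ m := by rcases hpos with h1 | h1 <;> omega
    have hga : vals.getD a 0 = vals[a] := List.getD_eq_getElem vals 0 h
    have hgm : vals.getD m 0 = vals[m] := List.getD_eq_getElem vals 0 hm
    have hsuffix : vals.drop a = vals[a] :: vals.drop (a + 1) := (List.getElem_cons_drop h).symm
    have hmin : ∀ y ∈ vals.drop a, vals[m] ≤ y := by
      intro y hy
      obtain ⟨j, hj, hyj⟩ := List.mem_iff_getElem.mp hy
      have hjl : a + j < vals.length := by
        have := hj
        rw [List.length_drop] at this
        omega
      have hyv : y = vals[a + j] := by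
        rw [← hyj, List.getElem_drop]
      rcases Nat.eq_zero_or_pos j with h0 | h0
      · subst h0
        rw [hyv, ← List.getD_eq_getElem vals 0 hjl, ← hgm]
        simpa using hle
      · rw [hyv, ← hgm, ← List.getD_eq_getElem vals 0 hjl]
        exact hall (a + j) (by omega) hjl
    rw [selSortLoopB_eq ((vals.set a (vals.getD m 0)).set m (vals.getD a 0)) (a + 1)]
    rcases Nat.eq_or_lt_of_le ham with hma | hma
    · -- m = a: the swap is the identity
      have hveq : (vals.set a (vals.getD m 0)).set m (vals.getD a 0) = vals := by
        rw [← hma, List.set_set, hga, List.set_getElem_self]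
      rw [hveq]
      have hs : PySem.List.sorted (vals.drop a) (fun x => x) false
          = vals[a] :: PySem.List.sorted (vals.drop (a + 1)) (fun x => x) false := by
        refine ez_sorted_perm_cons _ _ _ ?_ ?_
        · rw [hsuffix]
        · intro y hy
          have h2 := hmin y hy
          have h3 : vals[a]'h = vals[m]'hm := by
            congr 1
          rw [h3]
          exact h2
      rw [hs]
      have htake : vals.take (a + 1) = vals.take a ++ [vals[a]] := by
        rw [List.take_add_one, List.getElem?_eq_getElem h]; rfl
      rw [htake, List.append_assoc]
      rfl
    · -- a < m: a genuine swap
      have htake' : ((vals.set a (vals.getD m 0)).set m (vals.getD a 0)).take (a + 1)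
          = vals.take a ++ [vals[m]] := by
        rw [List.take_set_of_le (by omega), ezTakeSet _ _ _ h, hgm]
      have hdrop' : ((vals.set a (vals.getD m 0)).set m (vals.getD a 0)).drop (a + 1)
          = (vals.drop (a + 1)).set (m - (a + 1)) vals[a] := by
        rw [List.drop_set, if_neg (by omega : ¬ m < a + 1),
          List.drop_set_of_lt (by omega : a < a + 1), hga]
      have hk : m - (a + 1) < (vals.drop (a + 1)).length := by
        rw [List.length_drop]; omega
      have htk : (vals.drop (a + 1))[m - (a + 1)]'hk = vals[m] := by
        rw [List.getElem_drop]
        congr 1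
        omega
      have e1 : (vals.drop (a + 1)).take (m - (a + 1)) ++ vals[m] :: (vals.drop (a + 1)).drop (m - (a + 1) + 1)
          = vals.drop (a + 1) := by
        conv_rhs => rw [← List.take_append_drop (m - (a + 1)) (vals.drop (a + 1)),
          ← List.getElem_cons_drop hk, htk]
      have p1 : (vals[m] :: ((vals.drop (a + 1)).set (m - (a + 1)) vals[a])).Perm
          (vals[a] :: vals.drop (a + 1)) := by
        rw [List.set_eq_take_append_cons_drop, if_pos hk]
        refine List.Perm.trans (List.Perm.cons _ List.perm_middle) ?_
        refine List.Perm.trans (List.Perm.swap _ _ _) ?_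
        refine List.Perm.cons _ ?_
        refine List.Perm.trans List.perm_middle.symm ?_
        rw [e1]
      have hperm3 : (vals.drop a).Perm
          (vals[m] :: ((vals.set a (vals.getD m 0)).set m (vals.getD a 0)).drop (a + 1)) := by
        rw [hsuffix, hdrop']
        exact p1.symm
      have hs : PySem.List.sorted (vals.drop a) (fun x => x) false
          = vals[m] :: PySem.List.sorted
              (((vals.set a (vals.getD m 0)).set m (vals.getD a 0)).drop (a + 1)) (fun x => x) false :=
        ez_sorted_perm_cons _ _ _ hperm3 hmin
      rw [hs, htake', List.append_assoc]
      rfl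
  · simp only [dif_neg h]
    rw [List.take_of_length_le (by omega), List.drop_of_length_le (by omega)]
    simp [PySem.List.sorted]
termination_by vals.length - a
decreasing_by simp only [List.length_set]; omega

-- ---- B side: the write-back pass is the fill ----

-- the non-zero positions of items, as Nat offsets
def nzI : List Int → List Nat
  | [] => []
  | x :: xs => if x ≠ 0 then 0 :: (nzI xs).map (· + 1) else (nzI xs).map (· + 1)

-- the idxs list comprehension computes nzI, shifted by the enumerate start
theorem ez_idxs_eq (items : List Int) (s : Int) :
    ((PySem.List.enumerate items s).filter (fun p => decide (p.2 ≠ 0))).map Prod.fst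
      = (nzI items).map (fun k : Nat => s + (k : Int)) := by
  induction items generalizing s with
  | nil => simp [PySem.List.enumerate, nzI]
  | cons x xs ih =>
    rw [PySem.List.enumerate_cons, List.filter_cons]
    by_cases hx : x = 0
    · subst hx
      rw [if_neg (by simp)]
      rw [ih (s + 1)]
      simp only [nzI, if_neg (by simp : ¬((0 : Int) ≠ 0)), List.map_map]
      refine List.map_congr_left ?_
      intro k _
      simp only [Function.comp_apply]
      push_cast
      ring
    · rw [if_pos (by simpa using hx)]
      simp only [nzI, if_pos hx, List.map_cons, Nat.cast_zero, add_zero]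
      rw [ih (s + 1), List.map_map]
      congr 1
      refine List.map_congr_left ?_
      intro k _
      simp only [Function.comp_apply]
      push_cast
      ring

-- setting at shifted positions acts on the tail
theorem ez_fold_shift (ps : List (Nat × Int)) (y : Int) (l : List Int) :
    (ps.map (Prod.map (· + 1) id)).foldl (fun acc p => acc.set p.1 p.2) (y :: l)
      = y :: ps.foldl (fun acc p => acc.set p.1 p.2) l := by
  induction ps generalizing l with
  | nil => rfl
  | cons p ps ih =>
    simp only [List.map_cons, List.foldl_cons, Prod.map_fst, Prod.map_snd, id_eq]
    exact ih _

-- folding the sets over zip (nzI items) w is the fill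
theorem ez_fold_nzI (items w : List Int) :
    ((nzI items).zip w).foldl (fun acc p => acc.set p.1 p.2) items = ezFill items w := by
  induction items generalizing w with
  | nil => simp [nzI, ezFill]
  | cons x xs ih =>
    by_cases hx : x = 0
    · subst hx
      simp only [nzI, if_neg (by simp : ¬((0 : Int) ≠ 0))]
      rw [List.zip_map_left, ez_fold_shift, ih]
      simp [ezFill]
    · cases w with
      | nil =>
        simp only [nzI, if_pos hx, List.zip_nil_right, List.foldl_nil]
        rw [show ezFill (x :: xs) [] = x :: ezFill xs [] from by simp [ezFill, hx], ezFill_nil]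
      | cons v w' =>
        simp only [nzI, if_pos hx, List.zip_cons_cons, List.foldl_cons]
        rw [show ezFill (x :: xs) (v :: w') = v :: ezFill xs w' from by simp [ezFill, hx]]
        rw [List.zip_map_left]
        show (((nzI xs).zip w').map (Prod.map (· + 1) id)).foldl
          (fun acc p => acc.set p.1 p.2) (v :: xs) = v :: ezFill xs w'
        rw [ez_fold_shift, ih]

-- ===== VERDICT (by name: the statement is the Claim_ definition above) =====
theorem except_zero_spec : Claim_equal_except_zero := by
  intro items _
  unfold Spec_except_zero except_zero except_zero_alt
  rw [exceptZeroLoopA_eq _ _ (by simp [PySem.List.length_sorted]) 0 0]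
  simp only [List.take_zero, List.drop_zero, List.nil_append]
  rw [ez_filter_sorted_eq]
  rw [ez_idxs_eq items 0, List.zip_map_left, List.foldl_map]
  simp only [Prod.map_fst, Prod.map_snd, id_eq, zero_add, Int.toNat_natCast]
  rw [ez_fold_nzI, selSortLoopB_eq]
  simp
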